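-- pv_equiv track=rewrite | github.com/RFloEng/AC_to_SVJ | kn5_reader.py | map_ac_nodes_to_svj
-- ===== SOURCE A (Python) =====
-- _AC_TO_SVJ_BODY: list[tuple[list[str], str]] = [
--     (["BODY", "CHASSIS", "CAR_BODY", "BODY_HR", "COCKPIT_HR",
--       "EXTERIOR", "SHELL", "BODYSHELL"],                          "chassis"),
--     (["WHEEL_LF", "SUSP_LF", "WHEEL_FL", "SUSP_FL",
--       "UPRIGHT_LF", "HUB_LF"],                                   "upright_fl"),
--     (["WHEEL_RF", "SUSP_RF", "WHEEL_FR", "SUSP_FR",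
--       "UPRIGHT_RF", "HUB_RF"],                                   "upright_fr"),
--     (["WHEEL_LR", "SUSP_LR", "WHEEL_RL", "SUSP_RL",
--       "UPRIGHT_LR", "HUB_LR"],                                   "upright_rl"),
--     (["WHEEL_RR", "SUSP_RR", "UPRIGHT_RR", "HUB_RR"],            "upright_rr"),
-- ]
--
-- def map_ac_nodes_to_svj(node_names: list[str]) -> dict[str, str]:
--     """
--     Map AC node names to SVJ body ids.
--     Returns {svj_body_id: ac_node_name} for every SVJ body that was matched.
--     """
--     upper = {n.upper(): n for n in node_names}
--     result: dict[str, str] = {}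
--     for patterns, svj_id in _AC_TO_SVJ_BODY:
--         for pat in patterns:
--             if pat in upper:
--                 result[svj_id] = upper[pat]
--                 break
--     return result
-- ===== SOURCE B (Python) =====
-- _AC_TO_SVJ_BODY: list[tuple[list[str], str]] = [
--     (["BODY", "CHASSIS", "CAR_BODY", "BODY_HR", "COCKPIT_HR",
--       "EXTERIOR", "SHELL", "BODYSHELL"],                          "chassis"),
--     (["WHEEL_LF", "SUSP_LF", "WHEEL_FL", "SUSP_FL",
--       "UPRIGHT_LF", "HUB_LF"],                                   "upright_fl"),
--     (["WHEEL_RF", "SUSP_RF", "WHEEL_FR", "SUSP_FR",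
--       "UPRIGHT_RF", "HUB_RF"],                                   "upright_fr"),
--     (["WHEEL_LR", "SUSP_LR", "WHEEL_RL", "SUSP_RL",
--       "UPRIGHT_LR", "HUB_LR"],                                   "upright_rl"),
--     (["WHEEL_RR", "SUSP_RR", "UPRIGHT_RR", "HUB_RR"],            "upright_rr"),
-- ]
--
--
-- def map_ac_nodes_to_svj(node_names: list[str]) -> dict[str, str]:
--     """
--     Map AC node names to SVJ body ids.
--     For each SVJ body, scan the node list keeping the node whose uppercase
--     name matches the earliest-listed pattern of that body.
--     """
--     result: dict[str, str] = {}
--     for patterns, svj_id in _AC_TO_SVJ_BODY: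
--         best = None  # (pattern rank, node name)
--         for name in node_names:
--             u = name.upper()
--             if u in patterns:
--                 rank = patterns.index(u)
--                 if best is None or rank < best[0]:
--                     best = (rank, name)
--         if best is not None:
--             result[svj_id] = best[1]
--     return result
-- ===== Notes on version B (the rewrite author's own statement) =====
-- stated objective: alternative
-- what changed: B drops A's uppercase-name dictionary: per SVJ body it scans the node list once keeping the node with the lowest pattern rank; Pre_ excludes lists in which two nodes share an uppercase name listed in the table, where A's dict-overwrite accidentally keeps the last such node while B keeps the first.
-- outside the precondition, e.g. on map_ac_nodes_to_svj(['body', 'BODY']): A returns {'chassis': 'BODY'}, B returns {'chassis': 'body'}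
import Mathlib
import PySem

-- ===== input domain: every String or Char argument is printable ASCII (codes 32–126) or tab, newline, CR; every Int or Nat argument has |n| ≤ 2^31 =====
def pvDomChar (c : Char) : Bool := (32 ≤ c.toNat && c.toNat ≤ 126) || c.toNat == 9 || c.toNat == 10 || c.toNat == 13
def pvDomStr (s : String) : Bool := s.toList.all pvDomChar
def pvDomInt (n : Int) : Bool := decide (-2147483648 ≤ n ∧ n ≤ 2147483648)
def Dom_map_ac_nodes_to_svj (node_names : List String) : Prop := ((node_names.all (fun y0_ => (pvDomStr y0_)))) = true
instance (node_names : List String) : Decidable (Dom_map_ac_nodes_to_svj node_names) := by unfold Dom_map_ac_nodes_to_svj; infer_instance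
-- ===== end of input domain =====

-- B replaces A's uppercase-name dictionary by one lowest-rank scan of the node list per
-- SVJ body (alternative decomposition, no speed claim); Pre_ excludes duplicate table names.

-- the shared module constant _AC_TO_SVJ_BODY
def acToSvjBody : List (List String × String) := [
  (["BODY", "CHASSIS", "CAR_BODY", "BODY_HR", "COCKPIT_HR",
    "EXTERIOR", "SHELL", "BODYSHELL"],                          "chassis"),
  (["WHEEL_LF", "SUSP_LF", "WHEEL_FL", "SUSP_FL",
    "UPRIGHT_LF", "HUB_LF"],                                    "upright_fl"),
  (["WHEEL_RF", "SUSP_RF", "WHEEL_FR", "SUSP_FR",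
    "UPRIGHT_RF", "HUB_RF"],                                    "upright_fr"),
  (["WHEEL_LR", "SUSP_LR", "WHEEL_RL", "SUSP_RL",
    "UPRIGHT_LR", "HUB_LR"],                                    "upright_rl"),
  (["WHEEL_RR", "SUSP_RR", "UPRIGHT_RR", "HUB_RR"],             "upright_rr")]

-- every pattern of the table, in order
def pvAllPatterns : List String := acToSvjBody.flatMap (·.1)

-- ===== PORT A =====
-- A's inner 'for pat in patterns: if pat in upper: …; break' (value of upper[pat] at the break)
def pvRowMatchA (upper : PySem.Dict String String) : List String → Option String
  | [] => none
  | p :: ps =>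
      match upper.get? p with
      | some v => some v
      | none => pvRowMatchA upper ps

def map_ac_nodes_to_svj (node_names : List String) : List (String × String) :=
  let upper : PySem.Dict String String :=
    node_names.foldl (fun d n => d.insert (PySem.Str.upper n) n) PySem.Dict.empty
  (acToSvjBody.foldl (fun result row =>
      match pvRowMatchA upper row.1 with
      | some v => result.insert row.2 v
      | none => result) PySem.Dict.empty).items

-- ===== PORT B =====
-- B's inner scan: best (rank, name) over the node list (lowest rank wins)
def pvRowBestB (pats : List String) (node_names : List String) : Option (Nat × String) :=
  node_names.foldl (fun best name =>
      let u := PySem.Str.upper name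
      match PySem.List.index? pats u with
      | some rank =>
          match best with
          | none => some (rank, name)
          | some (r0, _) => if rank < r0 then some (rank, name) else best
      | none => best) none

def map_ac_nodes_to_svj_alt (node_names : List String) : List (String × String) :=
  (acToSvjBody.foldl (fun result row =>
      match pvRowBestB row.1 node_names with
      | some b => result.insert row.2 b.2
      | none => result) PySem.Dict.empty).items

-- ===== PRECONDITION & SPEC =====
-- Pre_ excludes lists in which two nodes share an uppercase name listed in the table:
-- there A's dict-overwrite accidentally keeps the LAST such node, B keeps the first.
def Pre_map_ac_nodes_to_svj (node_names : List String) : Prop :=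
  node_names.Pairwise (fun a b =>
    PySem.Str.upper a ∈ pvAllPatterns → PySem.Str.upper a ≠ PySem.Str.upper b)
instance (node_names : List String) : Decidable (Pre_map_ac_nodes_to_svj node_names) := by unfold Pre_map_ac_nodes_to_svj; infer_instance

def pvWitness_map_ac_nodes_to_svj : List String := ["body", "WHEEL_LF", "misc"]

def Spec_map_ac_nodes_to_svj (node_names : List String) (out : List (String × String)) : Prop := out = map_ac_nodes_to_svj_alt node_names
instance (node_names : List String) (out : List (String × String)) : Decidable (Spec_map_ac_nodes_to_svj node_names out) := by unfold Spec_map_ac_nodes_to_svj; infer_instance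

-- ===== CLAIM (what is proved, stated in full; the proofs are below) =====
def Claim_equal_map_ac_nodes_to_svj : Prop := ∀ (node_names : List String), Dom_map_ac_nodes_to_svj node_names → Pre_map_ac_nodes_to_svj node_names → Spec_map_ac_nodes_to_svj node_names (map_ac_nodes_to_svj node_names)

-- ===== LEMMAS AND PROOFS =====

-- the first pattern (from index i on) present in the dictionary, with its rank and stored value
def pvHit (d : PySem.Dict String String) : List String → Nat → Option (Nat × String)
  | [], _ => none
  | p :: ps, i =>
      match d.get? p with
      | some v => some (i, v)
      | none => pvHit d ps (i + 1)

lemma pvHit_ge (d : PySem.Dict String String) (pats : List String) :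
    ∀ (i j : Nat) (v : String), pvHit d pats i = some (j, v) → i ≤ j := by
  induction pats with
  | nil => intro i j v h; simp [pvHit] at h
  | cons p ps ih =>
      intro i j v h
      simp only [pvHit] at h
      cases hd : d.get? p with
      | some w => rw [hd] at h; simp at h; omega
      | none => rw [hd] at h; have := ih (i + 1) j v h; omega

lemma pvRowMatchA_eq_hit (d : PySem.Dict String String) (pats : List String) :
    ∀ i : Nat, pvRowMatchA d pats = (pvHit d pats i).map (·.2) := by
  induction pats with
  | nil => intro i; simp [pvRowMatchA, pvHit]
  | cons p ps ih =>
      intro i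
      simp only [pvRowMatchA, pvHit]
      cases hd : d.get? p with
      | some w => simp
      | none => exact ih (i + 1)

lemma pvHit_empty (pats : List String) : ∀ i, pvHit PySem.Dict.empty pats i = none := by
  induction pats with
  | nil => intro i; simp [pvHit]
  | cons p ps ih => intro i; simp [pvHit, PySem.Dict.get?_empty, ih]

lemma pvHit_insert_not_mem (d : PySem.Dict String String) (pats : List String)
    (k v : String) (hk : k ∉ pats) :
    ∀ i, pvHit (d.insert k v) pats i = pvHit d pats i := by
  induction pats with
  | nil => intro i; simp [pvHit]
  | cons p ps ih =>
      intro i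
      have hne : p ≠ k := by intro h; exact hk (by simp [h])
      have hk' : k ∉ ps := fun h => hk (List.mem_cons_of_mem _ h)
      simp only [pvHit, PySem.Dict.get?_insert_of_ne d v hne, ih hk']

-- inserting a FRESH key k (first index r in pats) makes pvHit the strict minimum-rank choice
lemma pvHit_insert_fresh (d : PySem.Dict String String) (k n : String) (pats : List String)
    (hfresh : d.get? k = none) :
    ∀ (i r : Nat), PySem.List.index? pats k = some r →
    pvHit (d.insert k n) pats i =
      (match pvHit d pats i with
       | none => some (i + r, n)
       | some (j, v) => if i + r < j then some (i + r, n) else some (j, v)) := by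
  induction pats with
  | nil => intro i r h; simp [PySem.List.index?_eq_idxOf?, List.idxOf?] at h
  | cons p ps ih =>
      intro i r h
      by_cases hpk : p = k
      · subst hpk
        rw [PySem.List.index?_cons_self] at h
        obtain rfl : (0 : Nat) = r := by injection h
        simp only [pvHit, PySem.Dict.get?_insert_self, hfresh]
        cases hh : pvHit d ps (i + 1) with
        | none => simp
        | some jv =>
            obtain ⟨j, v⟩ := jv
            have hij := pvHit_ge d ps (i + 1) j v hh
            simp only [Nat.add_zero]
            have : i < j := by omega
            simp [this]
      · rw [PySem.List.index?_cons_of_ne ps hpk] at h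
        cases hr' : PySem.List.index? ps k with
        | none => rw [hr'] at h; simp at h
        | some r' =>
            rw [hr'] at h
            simp only [Option.map_some, Option.some.injEq] at h
            subst h
            simp only [pvHit, PySem.Dict.get?_insert_of_ne d n hpk]
            cases hd : d.get? p with
            | some w =>
                have : ¬ (i + (r' + 1) < i) := by omega
                simp [this]
            | none =>
                rw [ih (i + 1) r' hr']
                cases hh : pvHit d ps (i + 1) with
                | none =>
                    have harith : i + 1 + r' = i + (r' + 1) := by omega
                    simp [harith]
                | some jv =>
                    have harith : i + 1 + r' = i + (r' + 1) := by omega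
                    simp [harith]

-- the invariant of B's scan: the running best equals pvHit of the dictionary built so far,
-- provided no remaining node re-uses a pattern name already inserted
lemma pvRowBestB_loop (pats : List String) (ns : List String) :
    ∀ (d : PySem.Dict String String) (b : Option (Nat × String)),
      b = pvHit d pats 0 →
      (∀ n ∈ ns, PySem.Str.upper n ∈ pats → d.get? (PySem.Str.upper n) = none) →
      ns.Pairwise (fun a b => PySem.Str.upper a ∈ pats → PySem.Str.upper a ≠ PySem.Str.upper b) →
      ns.foldl (fun best name =>
          let u := PySem.Str.upper name
          match PySem.List.index? pats u with
          | some rank =>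
              match best with
              | none => some (rank, name)
              | some (r0, _) => if rank < r0 then some (rank, name) else best
          | none => best) b
        = pvHit (ns.foldl (fun d n => d.insert (PySem.Str.upper n) n) d) pats 0 := by
  induction ns with
  | nil => intro d b hb _ _; simpa using hb
  | cons n ns ih =>
      intro d b hb hfresh hpw
      rw [List.pairwise_cons] at hpw
      obtain ⟨hn, hpw'⟩ := hpw
      simp only [List.foldl_cons]
      cases hidx : PySem.List.index? pats (PySem.Str.upper n) with
      | none =>
          have hmem : PySem.Str.upper n ∉ pats := (PySem.List.index?_eq_none_iff _ _).mp hidx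
          apply ih
          · rw [pvHit_insert_not_mem d pats _ n hmem 0]
            simpa [hidx] using hb
          · intro n' hn' hm'
            have hne : PySem.Str.upper n' ≠ PySem.Str.upper n := by
              intro h; exact hmem (h ▸ hm')
            rw [PySem.Dict.get?_insert_of_ne d n hne]
            exact hfresh n' (List.mem_cons_of_mem _ hn') hm'
          · exact hpw'
      | some r =>
          have hmem : PySem.Str.upper n ∈ pats := by
            rw [← PySem.List.index?_isSome_iff, hidx]; rfl
          have hd0 : d.get? (PySem.Str.upper n) = none := hfresh n (by simp) hmem
          apply ih
          · rw [pvHit_insert_fresh d _ n pats hd0 0 r hidx]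
            simp only [hb, Nat.zero_add]
            cases hh : pvHit d pats 0 with
            | none => simp
            | some jv => cases jv; simp
          · intro n' hn' hm'
            have hne : PySem.Str.upper n ≠ PySem.Str.upper n' := hn n' hn' hmem
            rw [PySem.Dict.get?_insert_of_ne d n (fun h => hne h.symm)]
            exact hfresh n' (List.mem_cons_of_mem _ hn') hm'
          · exact hpw'

lemma pvRowBestB_eq_hit (pats : List String) (ns : List String)
    (hpw : ns.Pairwise (fun a b => PySem.Str.upper a ∈ pats → PySem.Str.upper a ≠ PySem.Str.upper b)) :
    pvRowBestB pats ns =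
      pvHit (ns.foldl (fun d n => d.insert (PySem.Str.upper n) n) PySem.Dict.empty) pats 0 := by
  exact pvRowBestB_loop pats ns PySem.Dict.empty none (pvHit_empty pats 0).symm
    (fun n _ _ => PySem.Dict.get?_empty _) hpw

-- per row, A's break-loop value is the value component of B's best
lemma pvRow_agree (ns pats : List String)
    (hpw : ns.Pairwise (fun a b => PySem.Str.upper a ∈ pats → PySem.Str.upper a ≠ PySem.Str.upper b)) :
    pvRowMatchA (ns.foldl (fun d n => d.insert (PySem.Str.upper n) n) PySem.Dict.empty) pats
      = (pvRowBestB pats ns).map (·.2) := by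
  rw [pvRowBestB_eq_hit pats ns hpw, pvRowMatchA_eq_hit _ pats 0]

lemma pvFold_agree (ns : List String) (rows : List (List String × String))
    (hrows : ∀ row ∈ rows, ns.Pairwise (fun a b =>
        PySem.Str.upper a ∈ row.1 → PySem.Str.upper a ≠ PySem.Str.upper b)) :
    ∀ res : PySem.Dict String String,
      rows.foldl (fun result row =>
          match pvRowMatchA (ns.foldl (fun d n => d.insert (PySem.Str.upper n) n) PySem.Dict.empty) row.1 with
          | some v => result.insert row.2 v
          | none => result) res
      = rows.foldl (fun result row =>
          match pvRowBestB row.1 ns with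
          | some b => result.insert row.2 b.2
          | none => result) res := by
  induction rows with
  | nil => intro res; rfl
  | cons row rows ih =>
      intro res
      simp only [List.foldl_cons]
      rw [pvRow_agree ns row.1 (hrows row (by simp))]
      have ih' := ih (fun r hr => hrows r (by simp [hr]))
      cases h : pvRowBestB row.1 ns with
      | none => simp [ih']
      | some b => simp [ih']

-- ===== VERDICT (by name: the statement is the Claim_ definition above) =====
theorem map_ac_nodes_to_svj_spec : Claim_equal_map_ac_nodes_to_svj := by
  intro ns _ hpre
  unfold Spec_map_ac_nodes_to_svj map_ac_nodes_to_svj map_ac_nodes_to_svj_alt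
  show (acToSvjBody.foldl (fun result row =>
      match pvRowMatchA (ns.foldl (fun d n => d.insert (PySem.Str.upper n) n) PySem.Dict.empty) row.1 with
      | some v => result.insert row.2 v
      | none => result) PySem.Dict.empty).items = _
  rw [pvFold_agree ns acToSvjBody
    (fun row hrow => hpre.imp (fun {a b} h hm =>
      h (List.mem_flatMap.mpr ⟨row, hrow, hm⟩))) PySem.Dict.empty]
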